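-- pv_equiv track=rewrite | github.com/musflood/code-katas | string-pyramid/string_pyramid.py | watch_pyramid_from_above
-- ===== SOURCE A (Python) =====
-- def watch_pyramid_from_above(characters):
--     """Top view of a pyramid where each row is a char in the given string.
--
--                                        ccccc
--                                        cbbbc
--     watch_pyramid_from_above('abc') => cbabc
--                                        cbbbc
--                                        ccccc
--     """
--     if not characters:
--             return characters
--     pyramid = []
--     row_width = 1 + 2 * (len(characters) - 1)
--     edge = ''
--     for ch in characters:
--         pyramid.append('{}{}{}'.format(edge, ch * row_width, edge[::-1]))
--         edge += ch
--         row_width -= 2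
--     pyramid.extend(pyramid[-2::-1])
--     return '\n'.join(pyramid)
-- ===== SOURCE B (Python) =====
-- def watch_pyramid_from_above(characters):
--     if not characters:
--         return characters
--     N = 2 * len(characters) - 1
--     rows = []
--     for i in range(N):
--         d = min(i, N - 1 - i)
--         rows.append(characters[:d] + characters[d] * (N - 2 * d) + characters[:d][::-1])
--     return '\n'.join(rows)
-- ===== Notes on version B (the rewrite author's own statement) =====
-- stated objective: alternative
-- what changed: B computes each of the 2n-1 rows independently from the row's distance d = min(i, N-1-i) to the border (prefix + repeated char + reversed prefix), with no accumulated edge state and no mirroring of the row list.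
import Mathlib
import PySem

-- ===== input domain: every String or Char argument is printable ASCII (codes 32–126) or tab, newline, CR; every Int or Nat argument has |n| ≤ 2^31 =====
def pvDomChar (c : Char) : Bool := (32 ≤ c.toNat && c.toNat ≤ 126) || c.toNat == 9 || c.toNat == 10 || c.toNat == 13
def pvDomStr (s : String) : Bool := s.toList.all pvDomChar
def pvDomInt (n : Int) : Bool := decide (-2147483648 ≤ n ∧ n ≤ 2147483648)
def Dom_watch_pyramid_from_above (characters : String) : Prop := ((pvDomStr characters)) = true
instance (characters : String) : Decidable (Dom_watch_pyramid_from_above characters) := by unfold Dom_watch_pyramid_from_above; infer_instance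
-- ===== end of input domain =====

-- B computes every row independently from its distance to the border (no accumulated
-- edge, no mirroring of the row list); same asymptotic cost, different decomposition.

-- ===== PORT A =====
-- '{}{}{}'.format(edge, ch * row_width, edge[::-1]); Python str*int clamps a
-- non-positive width to '', exactly as Int.toNat does.
def wpfaRow (edge : List Char) (ch : Char) (rw : Int) : List Char :=
  edge ++ List.replicate rw.toNat ch ++ edge.reverse

-- the 'for ch in characters' loop, carrying (pyramid, edge, row_width)
def wpfaLoop : List Char → List (List Char) → List Char → Int → List (List Char)
  | [], pyramid, _, _ => pyramid
  | ch :: rest, pyramid, edge, rw =>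
      wpfaLoop rest (pyramid ++ [wpfaRow edge ch rw]) (edge ++ [ch]) (rw - 2)

def watch_pyramid_from_above (characters : String) : String :=
  if characters.toList = [] then characters
  else
    let pyramid := wpfaLoop characters.toList [] [] (1 + 2 * ((characters.toList.length : Int) - 1))
    -- pyramid.extend(pyramid[-2::-1]): xs[-2::-1] is xs without its last element, reversed (exact)
    String.ofList (List.intercalate ['\n'] (pyramid ++ pyramid.dropLast.reverse))

-- ===== PORT B =====
-- characters[:d] + characters[d] * (N - 2*d) + characters[:d][::-1] with d = min(i, N-1-i);
-- d < len(characters) always, so the getD default is never used; slices ported as take/reverse (exact).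
def wpfbRow (cs : List Char) (N i : Nat) : List Char :=
  let d := min i (N - 1 - i)
  cs.take d ++ List.replicate (N - 2 * d) (cs.getD d ' ') ++ (cs.take d).reverse

def watch_pyramid_from_above_alt (characters : String) : String :=
  if characters.toList = [] then characters
  else
    let cs := characters.toList
    let N := 2 * cs.length - 1
    String.ofList (List.intercalate ['\n'] ((List.range N).map (fun i => wpfbRow cs N i)))

-- ===== PRECONDITION & SPEC =====
def Spec_watch_pyramid_from_above (characters : String) (out : String) : Prop := out = watch_pyramid_from_above_alt characters
instance (characters : String) (out : String) : Decidable (Spec_watch_pyramid_from_above characters out) := by unfold Spec_watch_pyramid_from_above; infer_instance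

-- ===== CLAIM (what is proved, stated in full; the proofs are below) =====
def Claim_equal_watch_pyramid_from_above : Prop := ∀ (characters : String), Dom_watch_pyramid_from_above characters → Spec_watch_pyramid_from_above characters (watch_pyramid_from_above characters)

-- ===== LEMMAS AND PROOFS =====

-- proof-side abbreviation: A's i-th row (take i cs is A's 'edge' when row i is emitted)
def aRowF (cs : List Char) (i : Nat) : List Char :=
  wpfaRow (cs.take i) (cs.getD i ' ') ((1 + 2 * ((cs.length : Int) - 1)) - 2 * i)

-- A's loop appends one row per character; closed form of the state after the whole loop.
theorem wpfaLoop_eq (cs : List Char) : ∀ (p : List (List Char)) (e : List Char) (rw : Int),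
    wpfaLoop cs p e rw
      = p ++ (List.range cs.length).map
          (fun i => wpfaRow (e ++ cs.take i) (cs.getD i ' ') (rw - 2 * i)) := by
  induction cs with
  | nil => intro p e rw; simp [wpfaLoop]
  | cons ch rest ih =>
      intro p e rw
      rw [wpfaLoop, ih]
      simp only [List.length_cons, List.range_succ_eq_map, List.map_cons, List.map_map,
        List.append_assoc, List.singleton_append, List.take_zero, List.append_nil,
        List.getD_cons_zero]
      congr 1
      congr 1
      · norm_num
      apply List.map_congr_left
      intro i _
      simp only [Function.comp_def, List.take_succ_cons, List.getD_cons_succ]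
      congr 1
      push_cast; ring

-- one row of B (for i < n) is one row of A
theorem row_eq (cs : List Char) (i : Nat) (h1 : 1 ≤ cs.length) (hi : i < cs.length) :
    wpfbRow cs (2 * cs.length - 1) i = aRowF cs i := by
  unfold wpfbRow aRowF wpfaRow
  simp only [show min i (2 * cs.length - 1 - 1 - i) = i from by omega]
  congr 2
  rw [show ((1 + 2 * ((cs.length : Int) - 1)) - 2 * (i : Int)).toNat
      = 2 * cs.length - 1 - 2 * i from by omega]

-- B's rows are symmetric about the middle row
theorem row_symm (cs : List Char) (N i : Nat) (hi : i < N) :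
    wpfbRow cs N (N - 1 - i) = wpfbRow cs N i := by
  unfold wpfbRow
  simp only [show min (N - 1 - i) (N - 1 - (N - 1 - i)) = min i (N - 1 - i) from by omega]

-- the full row list of A (rows then mirror) equals the full row list of B
theorem rows_eq (cs : List Char) (h1 : 1 ≤ cs.length) :
    (List.range cs.length).map (aRowF cs)
        ++ ((List.range cs.length).map (aRowF cs)).dropLast.reverse
      = (List.range (2 * cs.length - 1)).map (wpfbRow cs (2 * cs.length - 1)) := by
  set n := cs.length with hn
  have hdrop : ((List.range n).map (aRowF cs)).dropLast = (List.range (n - 1)).map (aRowF cs) := by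
    conv_lhs => rw [show n = n - 1 + 1 from by omega, List.range_succ]
    simp
  rw [hdrop, ← List.map_reverse, ← List.map_append]
  apply List.ext_getElem?
  intro i
  by_cases hi : i < 2 * n - 1
  · rw [List.getElem?_eq_getElem (by simp; omega),
        List.getElem?_eq_getElem (by simp; omega)]
    simp only [List.getElem_map, List.getElem_range]
    congr 1
    by_cases hin : i < n
    · rw [List.getElem_append_left (by simpa using hin), List.getElem_range]
      exact (row_eq cs i h1 hin).symm
    · rw [List.getElem_append_right (by simpa using hin),
          List.getElem_reverse, List.getElem_range]
      have hidx : (List.range (n - 1)).length - 1 - (i - (List.range n).length)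
          = 2 * n - 1 - 1 - i := by simp; omega
      rw [hidx, ← row_eq cs (2 * n - 1 - 1 - i) h1 (by omega)]
      exact row_symm cs (2 * n - 1) i hi
  · rw [List.getElem?_eq_none (by simp; omega),
        List.getElem?_eq_none (by simp; omega)]

theorem watch_pyramid_from_above_eq (characters : String) :
    watch_pyramid_from_above characters = watch_pyramid_from_above_alt characters := by
  unfold watch_pyramid_from_above watch_pyramid_from_above_alt
  by_cases h : characters.toList = []
  · simp [h]
  · simp only [h, reduceIte]
    have h1 : 1 ≤ characters.toList.length := by
      cases hcs : characters.toList with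
      | nil => exact absurd hcs h
      | cons a t => simp
    congr 2
    rw [wpfaLoop_eq]
    simp only [List.nil_append]
    have hA : (fun i => wpfaRow (characters.toList.take i) (characters.toList.getD i ' ')
        ((1 + 2 * ((characters.toList.length : Int) - 1)) - 2 * i)) = aRowF characters.toList := rfl
    rw [hA]
    exact rows_eq characters.toList h1

-- ===== VERDICT (by name: the statement is the Claim_ definition above) =====
theorem watch_pyramid_from_above_spec : Claim_equal_watch_pyramid_from_above := by
  intro characters _
  unfold Spec_watch_pyramid_from_above
  exact watch_pyramid_from_above_eq characters
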